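-- pv_equiv track=rewrite | github.com/stasm-skypro/codewars-5-kyu | Simple Fun 125- Array Equalization/Simple Fun #125- Array Equalization.py | update_list2
-- ===== SOURCE A (Python) =====
-- def update_list2(lst, k):
--     ups = []
--     for x in set(lst):
--         cnt, i = 0, 0
--         while i < len(lst):
--             if lst[i] == x:
--                 i = i + 1
--             else:
--                 cnt = cnt + 1
--                 i = i + k
--         ups.append(cnt)
--     return min(ups)
-- ===== SOURCE B (Python) =====
-- def update_list2(lst, k):
--     # Backward dynamic programming: for each kept value x, cost[i] is the
--     # number of deletion jumps the forward walk makes starting at index i.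
--     # The table is held back-to-front (appended), so cost[-1] is the entry
--     # for index i+1 and cost[-k] the entry for index i+k.
--     best = None
--     for x in set(lst):
--         cost = []
--         for i in range(len(lst) - 1, -1, -1):
--             if lst[i] == x:
--                 v = cost[-1] if cost else 0
--             else:
--                 v = 1 + (cost[-k] if k <= len(cost) else 0)
--             cost.append(v)
--         c = cost[-1] if cost else 0
--         if best is None or c < best:
--             best = c
--     return best
-- ===== Notes on version B (the rewrite author's own statement) =====
-- stated objective: alternative
-- what changed: A walks a forward jumping pointer (i += 1 on a match, i += k on a deletion) per kept value and takes min of a list; B instead fills a backward dynamic-programming table of suffix costs per kept value (cost[i] from cost[i+1] or 1 + cost[i+k]) and keeps a running minimum — trading A's adaptive walk for a full table, so B is slower on large inputs with many distinct values.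
import Mathlib
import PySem

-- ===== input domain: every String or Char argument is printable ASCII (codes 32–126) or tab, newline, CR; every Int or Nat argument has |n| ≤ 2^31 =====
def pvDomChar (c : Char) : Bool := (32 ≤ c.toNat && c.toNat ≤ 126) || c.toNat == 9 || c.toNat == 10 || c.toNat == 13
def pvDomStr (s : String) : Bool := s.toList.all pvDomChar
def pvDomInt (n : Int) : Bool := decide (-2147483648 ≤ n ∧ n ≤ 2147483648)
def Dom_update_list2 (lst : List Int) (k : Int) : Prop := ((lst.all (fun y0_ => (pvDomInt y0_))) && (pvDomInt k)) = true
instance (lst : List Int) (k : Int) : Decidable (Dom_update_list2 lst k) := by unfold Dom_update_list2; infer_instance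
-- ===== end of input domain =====

-- B replaces A's forward jumping pointer per value with a backward DP over suffix
-- costs (objective: alternative algorithm; it trades A's adaptive walk for a full
-- per-value table, which is slower on large inputs with many distinct values).

-- ===== PORT A =====
-- A's while loop, fuel = lst.length (under Pre_, 1 ≤ k, each iteration raises i by ≥ 1, so fuel suffices)
def aLoop (lst : List Int) (x k : Int) (i cnt : Int) : Nat → Int
  | 0 => cnt
  | fuel + 1 =>
    if i < (lst.length : Int) then
      if PySem.List.pyGetD lst i 0 == x then aLoop lst x k (i + 1) cnt fuel
      else aLoop lst x k (i + k) (cnt + 1) fuel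
    else cnt

def update_list2 (lst : List Int) (k : Int) : Int :=
  let ups := (PySem.Set.ofList lst).map (fun x => aLoop lst x k 0 0 lst.length)
  (PySem.List.min? ups (fun y => y)).getD 0   -- min([]) raises ValueError: lst = [] is outside Pre_

-- ===== PORT B =====
-- Source B appends to `cost` and indexes it from the back (cost[-1], cost[-k]); the port keeps the
-- SAME list reversed, prepending: cost[-1] is the head, cost[-k] is element k-1, and the Python
-- guard k <= len(cost) is k - 1 < cost.length. After the fold, element j is cost[j].
def bCost (lst : List Int) (x k : Int) : List Int :=
  (PySem.List.pyRange ((lst.length : Int) - 1) (-1) (-1)).foldl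
    (fun cost i =>
      let v := if PySem.List.pyGetD lst i 0 == x then cost.headD 0
               else 1 + (if k - 1 < (cost.length : Int) then PySem.List.pyGetD cost (k - 1) 0 else 0)
      v :: cost) []

def update_list2_alt (lst : List Int) (k : Int) : Int :=
  let best := (PySem.Set.ofList lst).foldl
    (fun (best : Option Int) x =>
      let c := (bCost lst x k).headD 0
      match best with
      | none => some c
      | some b => if c < b then some c else some b) none
  best.getD 0   -- best is None only for lst = [], outside Pre_

-- ===== PRECONDITION & SPEC =====
-- Pre_ excludes exactly the inputs where A does not return: lst = [] (min of an empty sequence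
-- raises ValueError) and k ≤ 0 with lst non-constant, on which A's while loop never terminates
-- (for a constant lst the else branch never fires, so A returns even with k ≤ 0).
def Pre_update_list2 (lst : List Int) (k : Int) : Prop :=
  lst ≠ [] ∧ (1 ≤ k ∨ ∀ y ∈ lst, y = lst.headI)
instance (lst : List Int) (k : Int) : Decidable (Pre_update_list2 lst k) := by
  unfold Pre_update_list2; infer_instance

def pvWitness_update_list2 : List Int × Int := ([1, 2, 3, 2], 2)

def Spec_update_list2 (lst : List Int) (k : Int) (out : Int) : Prop := out = update_list2_alt lst k
instance (lst : List Int) (k : Int) (out : Int) : Decidable (Spec_update_list2 lst k out) := by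
  unfold Spec_update_list2; infer_instance

-- ===== CLAIM (what is proved, stated in full; the proofs are below) =====
def Claim_equal_update_list2 : Prop := ∀ (lst : List Int) (k : Int), Dom_update_list2 lst k → Pre_update_list2 lst k → Spec_update_list2 lst k (update_list2 lst k)

-- ===== LEMMAS AND PROOFS =====

-- the common mathematical cost: g j = deletions needed starting at index j, jump width km + 1
def gcost (lst : List Int) (x : Int) (km : Nat) (j : Nat) : Int :=
  if h : j < lst.length then
    if lst[j] = x then gcost lst x km (j + 1) else 1 + gcost lst x km (j + 1 + km)
  else 0
termination_by lst.length - j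
decreasing_by all_goals omega

theorem aLoop_eq_gcost (lst : List Int) (x : Int) (km : Nat) :
    ∀ (fuel : Nat) (j : Nat) (cnt : Int), lst.length - j ≤ fuel →
      aLoop lst x ((km : Int) + 1) (j : Int) cnt fuel = cnt + gcost lst x km j := by
  intro fuel
  induction fuel with
  | zero =>
    intro j cnt h
    have hj : ¬ j < lst.length := by omega
    simp [aLoop, gcost, hj]
  | succ fuel ih =>
    intro j cnt h
    by_cases hj : j < lst.length
    · have hji : (j : Int) < (lst.length : Int) := by exact_mod_cast hj
      have hget : PySem.List.pyGetD lst (j : Int) 0 = lst[j] := by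
        simp [PySem.List.pyGetD_natCast, hj]
      rw [aLoop, if_pos hji, hget]
      by_cases hx : lst[j] = x
      · have h1 : ((j : Int) + 1) = ((j + 1 : Nat) : Int) := by push_cast; ring
        rw [if_pos (by simpa using hx), h1, ih (j + 1) cnt (by omega)]
        conv_rhs => rw [gcost]
        simp [hj, hx]
      · have h1 : ((j : Int) + ((km : Int) + 1)) = ((j + 1 + km : Nat) : Int) := by push_cast; ring
        rw [if_neg (by simpa using hx), h1, ih (j + 1 + km) (cnt + 1) (by omega)]
        conv_rhs => rw [gcost]
        simp only [dif_pos hj, if_neg hx]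
        ring
    · have hji : ¬ (j : Int) < (lst.length : Int) := by exact_mod_cast hj
      rw [aLoop, if_neg hji, gcost]; simp [hj]

-- the list of suffix costs from index m on
def gList (lst : List Int) (x : Int) (km : Nat) (m : Nat) : List Int :=
  (List.range' m (lst.length - m)).map (gcost lst x km)

theorem headD_gList (lst : List Int) (x : Int) (km : Nat) (m : Nat) (hm : m ≤ lst.length) :
    (gList lst x km m).headD 0 = gcost lst x km m := by
  by_cases h : m < lst.length
  · have hsz : lst.length - m = (lst.length - (m + 1)) + 1 := by omega
    rw [gList, hsz, List.range'_succ, List.map_cons, List.headD_cons]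
  · have hsz : lst.length - m = 0 := by omega
    rw [gList, hsz, List.range', List.map_nil, List.headD_nil]
    rw [gcost]; simp [h]

theorem getElem_gList (lst : List Int) (x : Int) (km : Nat) (m t : Nat)
    (ht : t < lst.length - m) :
    (gList lst x km m)[t]'(by simpa [gList] using ht) = gcost lst x km (m + t) := by
  simp only [gList, List.getElem_map, List.getElem_range']
  congr 1
  omega

theorem bfold_eq_gList (lst : List Int) (x : Int) (km : Nat) :
    ∀ (j : Nat), j ≤ lst.length →
      (PySem.List.pyRange ((j : Int) - 1) (-1) (-1)).foldl
        (fun cost i =>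
          let v := if PySem.List.pyGetD lst i 0 == x then cost.headD 0
                   else 1 + (if (km : Int) + 1 - 1 < (cost.length : Int) then PySem.List.pyGetD cost ((km : Int) + 1 - 1) 0 else 0)
          v :: cost) (gList lst x km j) = gList lst x km 0 := by
  intro j
  induction j with
  | zero =>
    intro _
    rw [PySem.List.pyRange_neg_one_eq_nil (by omega)]
    simp [List.foldl]
  | succ j ih =>
    intro hj
    have hcons : PySem.List.pyRange (((j + 1 : Nat) : Int) - 1) (-1) (-1)
        = (j : Int) :: PySem.List.pyRange ((j : Int) - 1) (-1) (-1) := by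
      have : (((j + 1 : Nat) : Int) - 1) = (j : Int) := by push_cast; ring
      rw [this, PySem.List.pyRange_neg_one_cons (by omega)]
    rw [hcons, List.foldl_cons]
    have hlen : (gList lst x km (j + 1)).length = lst.length - (j + 1) := by
      simp [gList]
    have hget : PySem.List.pyGetD lst (j : Int) 0 = lst[j]'(by omega) := by
      simp [PySem.List.pyGetD_natCast, (by omega : j < lst.length)]
    have hstep :
        (let v := if PySem.List.pyGetD lst (j : Int) 0 == x then (gList lst x km (j + 1)).headD 0
                  else 1 + (if (km : Int) + 1 - 1 < ((gList lst x km (j + 1)).length : Int) then PySem.List.pyGetD (gList lst x km (j + 1)) ((km : Int) + 1 - 1) 0 else 0)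
         v :: gList lst x km (j + 1)) = gList lst x km j := by
      have hgj : gList lst x km j = gcost lst x km j :: gList lst x km (j + 1) := by
        have h1 : lst.length - j = (lst.length - (j + 1)) + 1 := by omega
        simp [gList, h1, List.range'_succ]
      rw [hgj]
      simp only [hget, hlen]
      congr 1
      by_cases hx : lst[j]'(by omega) = x
      · rw [if_pos (by simpa using hx)]
        rw [headD_gList lst x km (j + 1) (by omega)]
        conv_rhs => rw [gcost]
        simp [(by omega : j < lst.length), hx]
      · rw [if_neg (by simpa using hx)]
        conv_rhs => rw [gcost]
        simp only [dif_pos (by omega : j < lst.length), if_neg hx]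
        have hsimp : (km : Int) + 1 - 1 = ((km : Nat) : Int) := by ring
        rw [hsimp]
        by_cases hk : (km : Int) < ((lst.length - (j + 1) : Nat) : Int)
        · rw [if_pos hk]
          have hk' : km < lst.length - (j + 1) := by exact_mod_cast hk
          have : PySem.List.pyGetD (gList lst x km (j + 1)) ((km : Nat) : Int) 0
              = gcost lst x km (j + 1 + km) := by
            rw [PySem.List.pyGetD_natCast]
            rw [List.getD_eq_getElem _ _ (by simpa [gList] using hk')]
            exact getElem_gList lst x km (j + 1) km hk'
          rw [this]
        · rw [if_neg hk]
          have hk' : ¬ km < lst.length - (j + 1) := by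
            intro hc; exact hk (by exact_mod_cast hc)
          have hbig : ¬ (j + 1 + km) < lst.length := by omega
          rw [gcost]; simp [hbig]

    rw [hstep, ih (by omega)]

theorem bCost_eq (lst : List Int) (x : Int) (km : Nat) :
    bCost lst x ((km : Int) + 1) = gList lst x km 0 := by
  have h0 := bfold_eq_gList lst x km lst.length (le_refl _)
  have hnil : gList lst x km lst.length = [] := by simp [gList]
  rw [hnil] at h0
  unfold bCost
  exact h0

-- per value, the two inner algorithms agree
theorem perValue_eq (lst : List Int) (k : Int) (hk : 1 ≤ k) (x : Int) :
    aLoop lst x k 0 0 lst.length = (bCost lst x k).headD 0 := by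
  obtain ⟨km, hkm⟩ : ∃ km : Nat, k = (km : Int) + 1 := ⟨(k - 1).toNat, by omega⟩
  subst hkm
  have ha := aLoop_eq_gcost lst x km lst.length 0 0 (by omega)
  have hb := bCost_eq lst x km
  rw [hb, headD_gList lst x km 0 (by omega)]
  simpa using ha

-- on a constant list every probe matches, so A's loop never increments cnt
theorem aLoop_const (lst : List Int) (x k : Int) (hall : ∀ y ∈ lst, y = x) :
    ∀ (fuel : Nat) (j : Nat) (cnt : Int), lst.length - j ≤ fuel →
      aLoop lst x k (j : Int) cnt fuel = cnt := by
  intro fuel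
  induction fuel with
  | zero => intro j cnt h; simp [aLoop]
  | succ fuel ih =>
    intro j cnt h
    by_cases hj : j < lst.length
    · have hji : (j : Int) < (lst.length : Int) := by exact_mod_cast hj
      have hget : PySem.List.pyGetD lst (j : Int) 0 = lst[j] := by
        simp [PySem.List.pyGetD_natCast, hj]
      have hx : lst[j] = x := hall _ (List.getElem_mem hj)
      rw [aLoop, if_pos hji, hget, if_pos (by simpa using hx)]
      have h1 : ((j : Int) + 1) = ((j + 1 : Nat) : Int) := by push_cast; ring
      rw [h1, ih (j + 1) cnt (by omega)]
    · have hji : ¬ (j : Int) < (lst.length : Int) := by exact_mod_cast hj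
      rw [aLoop, if_neg hji]

-- on a constant list every entry B prepends is a copy of the previous head, i.e. 0
theorem bfold_const_zero (lst : List Int) (x k : Int) (hall : ∀ y ∈ lst, y = x) :
    ∀ (L : List Int) (acc : List Int), (∀ i ∈ L, 0 ≤ i ∧ i < (lst.length : Int)) →
      (∀ c ∈ acc, c = 0) →
      ∀ c ∈ L.foldl
        (fun cost i =>
          let v := if PySem.List.pyGetD lst i 0 == x then cost.headD 0
                   else 1 + (if k - 1 < (cost.length : Int) then PySem.List.pyGetD cost (k - 1) 0 else 0)
          v :: cost) acc, c = 0 := by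
  intro L
  induction L with
  | nil => intro acc _ hacc; simpa using hacc
  | cons i L ih =>
    intro acc hL hacc
    simp only [List.foldl_cons]
    have hi := hL i List.mem_cons_self
    have hmem : PySem.List.pyGetD lst i 0 ∈ lst := by
      apply PySem.List.pyGetD_mem
      simp only [PySem.Raise.InRange]
      omega
    have hx : PySem.List.pyGetD lst i 0 = x := hall _ hmem
    have hhead : acc.headD 0 = 0 := by
      cases acc with
      | nil => rfl
      | cons c cs => exact hacc c List.mem_cons_self
    apply ih
    · intro i' hi'; exact hL i' (List.mem_cons_of_mem _ hi')
    · intro c hc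
      simp only [hx, beq_self_eq_true, if_true, hhead] at hc
      rcases List.mem_cons.mp hc with h | h
      · exact h
      · exact hacc c h

theorem perValue_const (lst : List Int) (x k : Int) (hall : ∀ y ∈ lst, y = x) :
    aLoop lst x k 0 0 lst.length = (bCost lst x k).headD 0 := by
  have ha : aLoop lst x k ((0 : Nat) : Int) 0 lst.length = 0 :=
    aLoop_const lst x k hall lst.length 0 0 (by omega)
  have hb : ∀ c ∈ bCost lst x k, c = 0 := by
    apply bfold_const_zero lst x k hall
    · intro i hi
      have := (PySem.List.mem_pyRange_neg_one ..).mp hi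
      omega
    · intro c hc; exact absurd hc (List.not_mem_nil)
  have hbh : (bCost lst x k).headD 0 = 0 := by
    cases hB : bCost lst x k with
    | nil => rfl
    | cons c cs => exact hb c (by rw [hB]; exact List.mem_cons_self)
  rw [hbh]
  simpa using ha

-- B's running minimum over some-accumulator is a foldl min
theorem bMin_fold (f : Int → Int) (t : List Int) :
    ∀ (b : Int),
      t.foldl (fun (best : Option Int) x =>
        let c := f x
        match best with
        | none => some c
        | some b => if c < b then some c else some b) (some b)
      = some (t.foldl (fun b x => min b (f x)) b) := by
  induction t with
  | nil => intro b; simp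
  | cons y t ih =>
    intro b
    simp only [List.foldl_cons]
    have : (if f y < b then some (f y) else some b) = some (min b (f y)) := by
      rcases lt_or_ge (f y) b with h | h
      · rw [if_pos h, min_eq_right (le_of_lt h)]
      · rw [if_neg (not_lt.mpr h), min_eq_left h]
    rw [this, ih]

-- ===== VERDICT (by name: the statement is the Claim_ definition above) =====
theorem update_list2_spec : Claim_equal_update_list2 := by
  intro lst k _ hpre
  obtain ⟨hne, hk⟩ := hpre
  unfold Spec_update_list2 update_list2 update_list2_alt
  have hvals : PySem.Set.ofList lst ≠ [] := by
    obtain ⟨a, t0, ht0⟩ := List.exists_cons_of_ne_nil hne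
    have hm : a ∈ PySem.Set.ofList lst := by
      rw [PySem.Set.mem_ofList, ht0]; exact List.mem_cons_self
    intro hc; rw [hc] at hm; exact (List.not_mem_nil hm)
  obtain ⟨v, t, hvt⟩ := List.exists_cons_of_ne_nil hvals
  set f' : Int → Int := fun x => (bCost lst x k).headD 0 with hf'
  have hfb : ∀ x ∈ PySem.Set.ofList lst, aLoop lst x k 0 0 lst.length = f' x := by
    intro x hx
    rcases hk with hk | hconst
    · exact perValue_eq lst k hk x
    · have hx' : x = lst.headI := hconst x ((PySem.Set.mem_ofList _ _).mp hx)
      have hall : ∀ y ∈ lst, y = x := by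
        intro y hy; rw [hx']; exact hconst y hy
      exact perValue_const lst x k hall
  have hmap : (PySem.Set.ofList lst).map (fun x => aLoop lst x k 0 0 lst.length)
      = (PySem.Set.ofList lst).map f' := List.map_congr_left hfb
  rw [hmap, hvt]
  simp only [List.map_cons, List.foldl_cons]
  rw [PySem.List.min?_id_cons]
  simp only [Option.getD_some]
  rw [bMin_fold f' t]
  simp only [Option.getD_some]
  rw [List.foldl_map]
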